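-- pv_equiv track=rewrite | github.com/uzairrahmad/Best_Buy_ | promotions.py | apply_promotion
-- ===== SOURCE A (Python) =====
-- def apply_promotion(product, quantity):
--     final_total = 0
--     for number in range(1, quantity + 1):
--         if number % 3 == 0:
--             final_total += product * 0
--         else:
--             final_total += product * 1
--     return final_total
-- ===== SOURCE B (Python) =====
-- def apply_promotion(product, quantity):
--     n = quantity if quantity > 0 else 0
--     return product * (n - n // 3)
-- ===== Notes on version B (the rewrite author's own statement) =====
-- stated objective: faster
-- what changed: Replaced the O(quantity) loop over range(1, quantity+1) with the closed form product * (n - n//3) where n = max(quantity, 0).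
import Mathlib
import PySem

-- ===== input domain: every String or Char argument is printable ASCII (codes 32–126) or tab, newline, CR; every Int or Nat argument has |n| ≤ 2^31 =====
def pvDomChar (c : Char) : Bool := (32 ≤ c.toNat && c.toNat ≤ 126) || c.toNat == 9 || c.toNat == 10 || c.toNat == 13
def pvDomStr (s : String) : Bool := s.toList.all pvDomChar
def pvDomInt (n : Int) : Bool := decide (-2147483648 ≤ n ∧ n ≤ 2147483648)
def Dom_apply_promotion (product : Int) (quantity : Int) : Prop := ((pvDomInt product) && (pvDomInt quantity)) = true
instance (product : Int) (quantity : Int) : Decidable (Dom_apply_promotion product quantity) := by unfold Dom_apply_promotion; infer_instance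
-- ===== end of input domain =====

-- B replaces A's O(quantity) loop by the closed form product * (n - n//3), n = max(quantity, 0): faster (asymptotic).

-- ===== PORT A =====
def apply_promotion (product : Int) (quantity : Int) : Int :=
  (PySem.List.pyRange 1 (quantity + 1) 1).foldl
    (fun final_total number =>
      if PySem.Int.mod number 3 = 0 then final_total + product * 0
      else final_total + product * 1)
    0

-- ===== PORT B =====
def apply_promotion_alt (product : Int) (quantity : Int) : Int :=
  let n := if quantity > 0 then quantity else 0
  product * (n - PySem.Int.floordiv n 3)

-- ===== PRECONDITION & SPEC =====
def Spec_apply_promotion (product : Int) (quantity : Int) (out : Int) : Prop := out = apply_promotion_alt product quantity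
instance (product : Int) (quantity : Int) (out : Int) : Decidable (Spec_apply_promotion product quantity out) := by unfold Spec_apply_promotion; infer_instance

-- ===== CLAIM (what is proved, stated in full; the proofs are below) =====
def Claim_equal_apply_promotion : Prop := ∀ (product : Int) (quantity : Int), Dom_apply_promotion product quantity → Spec_apply_promotion product quantity (apply_promotion product quantity)

-- ===== LEMMAS AND PROOFS =====

-- shifting the initial accumulator out of A's fold
theorem pv_foldl_shift (l : List Int) (p : Int) (init : Int) :
    l.foldl (fun acc n => if PySem.Int.mod n 3 = 0 then acc + p * 0 else acc + p * 1) init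
    = init + l.foldl (fun acc n => if PySem.Int.mod n 3 = 0 then acc + p * 0 else acc + p * 1) 0 := by
  induction l generalizing init with
  | nil => simp
  | cons h t ih =>
    simp only [List.foldl_cons]
    rw [ih, ih (if PySem.Int.mod h 3 = 0 then 0 + p * 0 else 0 + p * 1)]
    split_ifs <;> ring

-- the loop over 1..n computed in closed form
theorem pv_loop_closed (p : Int) (n : Nat) :
    (PySem.List.pyRange 1 ((n : Int) + 1) 1).foldl
      (fun acc number => if PySem.Int.mod number 3 = 0 then acc + p * 0 else acc + p * 1) 0
    = p * ((n : Int) - PySem.Int.floordiv (n : Int) 3) := by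
  induction n with
  | zero => simp [PySem.List.pyRange_one_eq_nil, PySem.Int.floordiv]
  | succ m ih =>
    rw [show ((m + 1 : Nat) : Int) + 1 = ((m : Int) + 1) + 1 by push_cast; ring,
        PySem.List.pyRange_one_succ_right (by omega), List.foldl_append, pv_foldl_shift, ih]
    simp only [List.foldl_cons, List.foldl_nil]
    have h3 : PySem.Int.mod ((m : Int) + 1) 3 = ((m : Int) + 1) % 3 := by
      simp [PySem.Int.mod, Int.fmod_eq_emod]
    have hf : ∀ k : Int, PySem.Int.floordiv k 3 = k / 3 := by
      intro k; simp [PySem.Int.floordiv, Int.fdiv_eq_ediv]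
    rw [h3, hf, hf]
    push_cast
    by_cases hm : ((m : Int) + 1) % 3 = 0
    · rw [if_pos hm, show ((m : Int) + 1) - ((m : Int) + 1) / 3 = (m : Int) - (m : Int) / 3 by omega]
      ring
    · rw [if_neg hm, show ((m : Int) + 1) - ((m : Int) + 1) / 3 = ((m : Int) - (m : Int) / 3) + 1 by omega]
      ring

-- ===== VERDICT (by name: the statement is the Claim_ definition above) =====
theorem apply_promotion_spec : Claim_equal_apply_promotion := by
  intro p q _
  unfold Spec_apply_promotion apply_promotion apply_promotion_alt
  by_cases hq : q > 0
  · obtain ⟨n, rfl⟩ : ∃ n : Nat, q = (n : Int) := ⟨q.toNat, by omega⟩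
    simp only [if_pos hq]
    exact pv_loop_closed p n
  · rw [if_neg hq, PySem.List.pyRange_one_eq_nil (by omega)]
    simp [PySem.Int.floordiv]
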